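-- pv_equiv track=rewrite | github.com/sputniklaika28-coder/Flauna | apps/gm/src/tacex_gm/models/constants.py | lookup_range_difficulty
-- ===== SOURCE A (Python) =====
-- from enum import StrEnum
-- from typing import Final
--
-- class RangeClass(StrEnum):
--     SMALL_RANGED = "small_ranged"
--     MEDIUM_RANGED = "medium_ranged"
--     LARGE_RANGED = "large_ranged"
--     PEG_RANGED = "peg_ranged"
--
-- RANGE_DIFFICULTY_TABLE: Final[dict[RangeClass, list[tuple[int, int, str | None]]]] = {
--     RangeClass.SMALL_RANGED: [
--         (0, 3, "NORMAL"),
--         (4, 8, "HARD"),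
--         (9, 11, "ULTRA_HARD"),
--     ],
--     RangeClass.MEDIUM_RANGED: [
--         (0, 3, "HARD"),
--         (4, 8, "NORMAL"),
--         (9, 11, "HARD"),
--     ],
--     RangeClass.LARGE_RANGED: [
--         (0, 8, "HARD"),
--         (9, 11, "NORMAL"),
--     ],
--     RangeClass.PEG_RANGED: [
--         (0, 5, "NORMAL"),
--         (6, 8, "HARD"),
--         (9, 11, "ULTRA_HARD"),
--     ],
-- }
--
-- def lookup_range_difficulty(range_class: RangeClass, distance: int) -> str | None:
--     """Return the difficulty label or ``None`` if the distance is out of range."""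
--
--     bands = RANGE_DIFFICULTY_TABLE.get(range_class)
--     if bands is None:
--         return None
--     for low, high, label in bands:
--         if low <= distance <= high:
--             return label
--     return None
-- ===== SOURCE B (Python) =====
-- def lookup_range_difficulty(range_class, distance):
--     # No table at all: one bounds check, then threshold arithmetic per class.
--     if not 0 <= distance <= 11:
--         return None
--     if range_class == "small_ranged":
--         return "NORMAL" if distance <= 3 else "HARD" if distance <= 8 else "ULTRA_HARD"
--     if range_class == "medium_ranged":
--         return "NORMAL" if 4 <= distance <= 8 else "HARD"
--     if range_class == "large_ranged":
--         return "NORMAL" if distance >= 9 else "HARD"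
--     if range_class == "peg_ranged":
--         return "NORMAL" if distance <= 5 else "HARD" if distance <= 8 else "ULTRA_HARD"
--     return None
-- ===== Notes on version B (the rewrite author's own statement) =====
-- stated objective: simpler
-- what changed: The band table and per-call interval scan are removed entirely: B does one 0..11 bounds check and then picks the label by direct threshold comparisons per range class (no table, no loop).
import Mathlib
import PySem

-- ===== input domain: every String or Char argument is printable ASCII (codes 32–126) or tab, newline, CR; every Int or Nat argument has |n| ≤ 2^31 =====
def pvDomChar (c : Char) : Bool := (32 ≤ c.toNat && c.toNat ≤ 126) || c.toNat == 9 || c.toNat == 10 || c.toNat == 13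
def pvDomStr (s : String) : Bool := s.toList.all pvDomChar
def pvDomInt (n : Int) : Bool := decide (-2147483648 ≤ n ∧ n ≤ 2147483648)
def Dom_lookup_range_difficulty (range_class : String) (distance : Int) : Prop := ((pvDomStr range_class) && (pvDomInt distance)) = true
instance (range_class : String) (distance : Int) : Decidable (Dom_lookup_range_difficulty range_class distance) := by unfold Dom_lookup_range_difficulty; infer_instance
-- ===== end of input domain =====

-- B drops the band table entirely: a single 0..11 bounds check followed by
-- direct threshold comparisons per range class (objective: simpler).


-- ===== PORT A =====
-- RANGE_DIFFICULTY_TABLE (StrEnum keys are their string values)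
def pvTableA : PySem.Dict String (List (Int × Int × String)) := PySem.Dict.ofList [
  ("small_ranged", [(0, 3, "NORMAL"), (4, 8, "HARD"), (9, 11, "ULTRA_HARD")]),
  ("medium_ranged", [(0, 3, "HARD"), (4, 8, "NORMAL"), (9, 11, "HARD")]),
  ("large_ranged", [(0, 8, "HARD"), (9, 11, "NORMAL")]),
  ("peg_ranged", [(0, 5, "NORMAL"), (6, 8, "HARD"), (9, 11, "ULTRA_HARD")])]

-- the 'for low, high, label in bands: if low <= distance <= high: return label' loop
def pvLoopA : List (Int × Int × String) → Int → Option String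
  | [], _ => none
  | (low, high, label) :: rest, d => if low ≤ d ∧ d ≤ high then some label else pvLoopA rest d

def lookup_range_difficulty (range_class : String) (distance : Int) : Option String :=
  match pvTableA.get? range_class with
  | none => none
  | some bands => pvLoopA bands distance

-- ===== PORT B =====
-- Source B: one bounds check, then threshold comparisons per class; no table, no loop.
def lookup_range_difficulty_alt (range_class : String) (distance : Int) : Option String :=
  if ¬ (0 ≤ distance ∧ distance ≤ 11) then none
  else if range_class = "small_ranged" then
    some (if distance ≤ 3 then "NORMAL" else if distance ≤ 8 then "HARD" else "ULTRA_HARD")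
  else if range_class = "medium_ranged" then
    some (if 4 ≤ distance ∧ distance ≤ 8 then "NORMAL" else "HARD")
  else if range_class = "large_ranged" then
    some (if 9 ≤ distance then "NORMAL" else "HARD")
  else if range_class = "peg_ranged" then
    some (if distance ≤ 5 then "NORMAL" else if distance ≤ 8 then "HARD" else "ULTRA_HARD")
  else none

-- ===== PRECONDITION & SPEC =====
def Spec_lookup_range_difficulty (range_class : String) (distance : Int) (out : Option String) : Prop := out = lookup_range_difficulty_alt range_class distance
instance (range_class : String) (distance : Int) (out : Option String) : Decidable (Spec_lookup_range_difficulty range_class distance out) := by unfold Spec_lookup_range_difficulty; infer_instance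

-- ===== CLAIM =====
def Claim_equal_lookup_range_difficulty : Prop := ∀ (range_class : String) (distance : Int), Dom_lookup_range_difficulty range_class distance → Spec_lookup_range_difficulty range_class distance (lookup_range_difficulty range_class distance)

-- ===== LEMMAS AND PROOFS =====
theorem hSmallA : pvTableA.get? "small_ranged" = some [(0, 3, "NORMAL"), (4, 8, "HARD"), (9, 11, "ULTRA_HARD")] := by decide
theorem hMediumA : pvTableA.get? "medium_ranged" = some [(0, 3, "HARD"), (4, 8, "NORMAL"), (9, 11, "HARD")] := by decide
theorem hLargeA : pvTableA.get? "large_ranged" = some [(0, 8, "HARD"), (9, 11, "NORMAL")] := by decide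
theorem hPegA : pvTableA.get? "peg_ranged" = some [(0, 5, "NORMAL"), (6, 8, "HARD"), (9, 11, "ULTRA_HARD")] := by decide

theorem pvTableAEq : pvTableA = PySem.Dict.mk [
  ("small_ranged", [(0, 3, "NORMAL"), (4, 8, "HARD"), (9, 11, "ULTRA_HARD")]),
  ("medium_ranged", [(0, 3, "HARD"), (4, 8, "NORMAL"), (9, 11, "HARD")]),
  ("large_ranged", [(0, 8, "HARD"), (9, 11, "NORMAL")]),
  ("peg_ranged", [(0, 5, "NORMAL"), (6, 8, "HARD"), (9, 11, "ULTRA_HARD")])] := by decide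

theorem hOtherA (rc : String) (h1 : rc ≠ "small_ranged") (h2 : rc ≠ "medium_ranged")
    (h3 : rc ≠ "large_ranged") (h4 : rc ≠ "peg_ranged") : pvTableA.get? rc = none := by
  rw [pvTableAEq]
  simp only [PySem.Dict.get?_mk_cons, beq_iff_eq]
  rw [if_neg (fun h => h1 h.symm), if_neg (fun h => h2 h.symm),
      if_neg (fun h => h3 h.symm), if_neg (fun h => h4 h.symm)]
  rfl

theorem pvSmallCase (d : Int) : pvLoopA [(0, 3, "NORMAL"), (4, 8, "HARD"), (9, 11, "ULTRA_HARD")] d = lookup_range_difficulty_alt "small_ranged" d := by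
  by_cases h : 0 ≤ d ∧ d ≤ 11
  · obtain ⟨h0, h1⟩ := h; interval_cases d <;> decide
  · unfold lookup_range_difficulty_alt
    rw [if_pos h]
    simp only [pvLoopA]
    rw [if_neg (by omega), if_neg (by omega), if_neg (by omega)]

theorem pvMediumCase (d : Int) : pvLoopA [(0, 3, "HARD"), (4, 8, "NORMAL"), (9, 11, "HARD")] d = lookup_range_difficulty_alt "medium_ranged" d := by
  by_cases h : 0 ≤ d ∧ d ≤ 11
  · obtain ⟨h0, h1⟩ := h; interval_cases d <;> decide
  · unfold lookup_range_difficulty_alt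
    rw [if_pos h]
    simp only [pvLoopA]
    rw [if_neg (by omega), if_neg (by omega), if_neg (by omega)]

theorem pvLargeCase (d : Int) : pvLoopA [(0, 8, "HARD"), (9, 11, "NORMAL")] d = lookup_range_difficulty_alt "large_ranged" d := by
  by_cases h : 0 ≤ d ∧ d ≤ 11
  · obtain ⟨h0, h1⟩ := h; interval_cases d <;> decide
  · unfold lookup_range_difficulty_alt
    rw [if_pos h]
    simp only [pvLoopA]
    rw [if_neg (by omega), if_neg (by omega)]

theorem pvPegCase (d : Int) : pvLoopA [(0, 5, "NORMAL"), (6, 8, "HARD"), (9, 11, "ULTRA_HARD")] d = lookup_range_difficulty_alt "peg_ranged" d := by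
  by_cases h : 0 ≤ d ∧ d ≤ 11
  · obtain ⟨h0, h1⟩ := h; interval_cases d <;> decide
  · unfold lookup_range_difficulty_alt
    rw [if_pos h]
    simp only [pvLoopA]
    rw [if_neg (by omega), if_neg (by omega), if_neg (by omega)]

-- ===== VERDICT =====
theorem lookup_range_difficulty_spec : Claim_equal_lookup_range_difficulty := by
  intro rc d _
  show lookup_range_difficulty rc d = lookup_range_difficulty_alt rc d
  by_cases h1 : rc = "small_ranged"
  · subst h1; unfold lookup_range_difficulty; rw [hSmallA]; exact pvSmallCase d
  by_cases h2 : rc = "medium_ranged"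
  · subst h2; unfold lookup_range_difficulty; rw [hMediumA]; exact pvMediumCase d
  by_cases h3 : rc = "large_ranged"
  · subst h3; unfold lookup_range_difficulty; rw [hLargeA]; exact pvLargeCase d
  by_cases h4 : rc = "peg_ranged"
  · subst h4; unfold lookup_range_difficulty; rw [hPegA]; exact pvPegCase d
  · unfold lookup_range_difficulty lookup_range_difficulty_alt
    rw [hOtherA rc h1 h2 h3 h4]
    split_ifs <;> simp_all
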